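-- pv_equiv track=rewrite | github.com/MaritoLK/demo_tunnels_simulation | backend/app/engine/skill.py | tier_for
-- ===== SOURCE A (Python) =====
-- WALK_SKILL_TIERS = (
--     (0,   1),   # apprentice: 3x3
--     (50,  2),   # journeyman: 5x5
--     (150, 3),   # veteran:    7x7
-- )
--
-- def tier_for(tiles_walked):
--     """Index into WALK_SKILL_TIERS. Useful for UI labels (apprentice /
--     journeyman / veteran)."""
--     tier = 0
--     for i, (threshold, _r) in enumerate(WALK_SKILL_TIERS):
--         if tiles_walked >= threshold:
--             tier = i
--         else:
--             break
--     return tier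
-- ===== SOURCE B (Python) =====
-- WALK_SKILL_TIERS = (
--     (0,   1),   # apprentice: 3x3
--     (50,  2),   # journeyman: 5x5
--     (150, 3),   # veteran:    7x7
-- )
--
-- def tier_for(tiles_walked):
--     """Index into WALK_SKILL_TIERS, found by binary search over the
--     ascending threshold column instead of a forward linear scan."""
--     thresholds = [t for t, _r in WALK_SKILL_TIERS]
--     lo, hi = 0, len(thresholds)
--     while lo < hi:
--         mid = (lo + hi) // 2
--         if tiles_walked < thresholds[mid]:
--             hi = mid
--         else:
--             lo = mid + 1
--     return max(0, lo - 1)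
-- ===== Notes on version B (the rewrite author's own statement) =====
-- stated objective: alternative
-- what changed: Replaces A's forward linear scan with early break over enumerate(WALK_SKILL_TIERS) by a hand-written binary search (bisect_right) over the ascending threshold column, returning max(0, insertion_point - 1).
import Mathlib
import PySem

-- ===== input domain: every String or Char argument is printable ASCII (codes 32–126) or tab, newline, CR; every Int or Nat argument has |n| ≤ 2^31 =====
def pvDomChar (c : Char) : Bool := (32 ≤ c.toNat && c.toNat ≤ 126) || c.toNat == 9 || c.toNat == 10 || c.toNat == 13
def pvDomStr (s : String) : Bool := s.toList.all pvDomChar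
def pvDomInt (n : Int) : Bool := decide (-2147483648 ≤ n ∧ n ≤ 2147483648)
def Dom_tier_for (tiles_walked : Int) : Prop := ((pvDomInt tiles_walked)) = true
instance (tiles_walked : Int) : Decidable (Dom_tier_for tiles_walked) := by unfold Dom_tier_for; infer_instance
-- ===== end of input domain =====

-- B replaces A's linear scan with a hand-written binary search over the threshold column; return values agree on all Int inputs.
-- ===== PORT A =====
def WALK_SKILL_TIERS : List (Int × Int) := [(0, 1), (50, 2), (150, 3)]

-- A's for-loop over enumerate(WALK_SKILL_TIERS) with early break, as structural recursion over the same state.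
def tierForLoop (tiles_walked : Int) : List (Int × (Int × Int)) → Int → Int
  | [], tier => tier
  | (i, (threshold, _r)) :: rest, tier =>
      if tiles_walked ≥ threshold then tierForLoop tiles_walked rest i else tier

def tier_for (tiles_walked : Int) : Int :=
  tierForLoop tiles_walked (PySem.List.enumerate WALK_SKILL_TIERS) 0

-- ===== PORT B =====
-- Source B's hand-written bisect_right while-loop (lo/hi halving), step for step.
-- (fuel = initial interval width bounds the iteration count; it only makes the loop total)
def bsearchLoop (thresholds : List Int) (x : Int) : Nat → Nat → Nat → Nat
  | 0, lo, _hi => lo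
  | fuel + 1, lo, hi =>
    if lo < hi then
      let mid := (lo + hi) / 2
      if x < thresholds.getD mid 0 then bsearchLoop thresholds x fuel lo mid
      else bsearchLoop thresholds x fuel (mid + 1) hi
    else lo

def tier_for_alt (tiles_walked : Int) : Int :=
  let thresholds := WALK_SKILL_TIERS.map Prod.fst
  max 0 ((bsearchLoop thresholds tiles_walked thresholds.length 0 thresholds.length : Int) - 1)

-- ===== PRECONDITION & SPEC =====
def Spec_tier_for (tiles_walked : Int) (out : Int) : Prop := out = tier_for_alt tiles_walked
instance (tiles_walked : Int) (out : Int) : Decidable (Spec_tier_for tiles_walked out) := by unfold Spec_tier_for; infer_instance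

-- ===== CLAIM (what is proved, stated in full; the proofs are below) =====
def Claim_equal_tier_for : Prop := ∀ (tiles_walked : Int), Dom_tier_for tiles_walked → Spec_tier_for tiles_walked (tier_for tiles_walked)

-- ===== LEMMAS AND PROOFS =====

-- ===== VERDICT (by name: the statement is the Claim_ definition above) =====
theorem tier_for_spec : Claim_equal_tier_for := by
  intro t _
  unfold Spec_tier_for tier_for tier_for_alt WALK_SKILL_TIERS
  by_cases h0 : t < 0 <;> by_cases h50 : t < 50 <;> by_cases h150 : t < 150 <;>
    simp [PySem.List.enumerate, tierForLoop, bsearchLoop, h0, h50, h150] <;> omega
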